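-- pv_equiv track=rewrite | github.com/kctamjustcode/edu_ict_ai | maha_dist_def.py | td_mahat
-- ===== SOURCE A (Python) =====
-- def td_mahat(s):
--     mahat = 0
--     curr = [0, 0]
--     for i in range(len(s)):
--         if s[i] == 'u':
--             curr[1] += 1
--         elif s[i] == 'd':
--             curr[1] -= 1
--         elif s[i] == 'r':
--             curr[0] += 1
--         elif s[i] == 'l':
--             curr[0] -= 1
--         mahat = max(mahat, abs(curr[0]) + abs(curr[1]))
--     return mahat
-- ===== SOURCE B (Python) =====
-- def td_mahat(s):
--     # Rotation trick: |x|+|y| = max(|x+y|, |x-y|).  Track the two rotated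
--     # coordinates p = x+y and q = x-y as plain prefix sums of per-char
--     # contributions, keeping only their running max and min; the answer is
--     # max(hi_p, -lo_p, hi_q, -lo_q) -- no position or Manhattan value is ever
--     # computed inside the loop.
--     P = {'u': 1, 'd': -1, 'r': 1, 'l': -1}
--     Q = {'u': -1, 'd': 1, 'r': 1, 'l': -1}
--     p = q = hi_p = lo_p = hi_q = lo_q = 0
--     for c in s:
--         p += P.get(c, 0)
--         q += Q.get(c, 0)
--         hi_p = max(hi_p, p)
--         lo_p = min(lo_p, p)
--         hi_q = max(hi_q, q)
--         lo_q = min(lo_q, q)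
--     return max(hi_p, -lo_p, hi_q, -lo_q)
-- ===== Notes on version B (the rewrite author's own statement) =====
-- stated objective: alternative
-- what changed: B drops A's position/running-Manhattan-max state entirely and uses the Chebyshev rotation |x|+|y| = max(|x+y|,|x-y|): it tracks the rotated prefix sums p=x+y and q=x-y with their running max and min, returning max(hi_p,-lo_p,hi_q,-lo_q).
import Mathlib
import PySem

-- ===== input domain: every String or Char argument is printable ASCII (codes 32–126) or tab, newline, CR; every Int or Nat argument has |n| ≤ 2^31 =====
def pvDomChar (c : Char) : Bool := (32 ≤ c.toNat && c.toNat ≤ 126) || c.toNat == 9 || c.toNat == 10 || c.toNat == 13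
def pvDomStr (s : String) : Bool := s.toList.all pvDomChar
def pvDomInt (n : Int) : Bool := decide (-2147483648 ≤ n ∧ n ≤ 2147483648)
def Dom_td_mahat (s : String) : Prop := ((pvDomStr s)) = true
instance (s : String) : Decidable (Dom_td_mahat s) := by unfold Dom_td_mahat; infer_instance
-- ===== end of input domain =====

-- B uses the Chebyshev rotation |x|+|y| = max(|x+y|,|x-y|): it tracks running max/min
-- of the rotated prefix sums p=x+y, q=x-y instead of positions and a running Manhattan max.

-- ===== PORT A =====
-- A's loop over s[i], updating curr = [x, y] and the running max mahat; state = (mahat, x, y).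
def td_mahat (s : String) : Int :=
  (s.toList.foldl
    (fun (st : Int × Int × Int) c =>
      let m := st.1
      let x := st.2.1
      let y := st.2.2
      let p : Int × Int :=
        if c = 'u' then (x, y + 1)
        else if c = 'd' then (x, y - 1)
        else if c = 'r' then (x + 1, y)
        else if c = 'l' then (x - 1, y)
        else (x, y)
      (max m (|p.1| + |p.2|), p.1, p.2))
    (0, 0, 0)).1

-- ===== PORT B =====
-- P.get(c, 0): contribution of c to p = x + y
def tdP (c : Char) : Int :=
  if c = 'u' then 1 else if c = 'd' then -1
  else if c = 'r' then 1 else if c = 'l' then -1 else 0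

-- Q.get(c, 0): contribution of c to q = x - y
def tdQ (c : Char) : Int :=
  if c = 'u' then -1 else if c = 'd' then 1
  else if c = 'r' then 1 else if c = 'l' then -1 else 0

-- loop state = (p, q, hi_p, lo_p, hi_q, lo_q)
def td_mahat_alt (s : String) : Int :=
  let st := s.toList.foldl
    (fun (st : Int × Int × Int × Int × Int × Int) c =>
      let p := st.1 + tdP c
      let q := st.2.1 + tdQ c
      (p, q, max st.2.2.1 p, min st.2.2.2.1 p, max st.2.2.2.2.1 q, min st.2.2.2.2.2 q))
    (0, 0, 0, 0, 0, 0)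
  max (max (max st.2.2.1 (-st.2.2.2.1)) st.2.2.2.2.1) (-st.2.2.2.2.2)

-- ===== PRECONDITION & SPEC =====
def Spec_td_mahat (s : String) (out : Int) : Prop := out = td_mahat_alt s
instance (s : String) (out : Int) : Decidable (Spec_td_mahat s out) := by unfold Spec_td_mahat; infer_instance

-- ===== CLAIM =====
def Claim_equal_td_mahat : Prop := ∀ (s : String), Dom_td_mahat s → Spec_td_mahat s (td_mahat s)

-- ===== LEMMAS AND PROOFS =====

-- -min a b = max (-a) (-b), for pushing negation through the running minima
theorem td_neg_min (a b : Int) : -min a b = max (-a) (-b) := (max_neg_neg a b).symm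

-- |a| + |b| = max(|a+b|, |a-b|), written with max/neg so omega can consume it
theorem td_abs_rot (a b : Int) :
    |a| + |b| = max (max (a + b) (-(a + b))) (max (a - b) (-(a - b))) := by
  simp only [abs_eq_max_neg]; omega

-- A's per-character position step, rotated: sum and difference move by tdP / tdQ
theorem td_step (c : Char) (x y : Int) :
    (if c = 'u' then ((x, y + 1) : Int × Int)
     else if c = 'd' then (x, y - 1)
     else if c = 'r' then (x + 1, y)
     else if c = 'l' then (x - 1, y)
     else (x, y)).1
    + (if c = 'u' then ((x, y + 1) : Int × Int)
       else if c = 'd' then (x, y - 1)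
       else if c = 'r' then (x + 1, y)
       else if c = 'l' then (x - 1, y)
       else (x, y)).2 = (x + y) + tdP c
    ∧ (if c = 'u' then ((x, y + 1) : Int × Int)
       else if c = 'd' then (x, y - 1)
       else if c = 'r' then (x + 1, y)
       else if c = 'l' then (x - 1, y)
       else (x, y)).1
      - (if c = 'u' then ((x, y + 1) : Int × Int)
         else if c = 'd' then (x, y - 1)
         else if c = 'r' then (x + 1, y)
         else if c = 'l' then (x - 1, y)
         else (x, y)).2 = (x - y) + tdQ c := by
  unfold tdP tdQ
  split_ifs <;> constructor <;> ring

-- Loop invariant: p = x+y, q = x-y, and the running Manhattan max m equals the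
-- combination of the four rotated running extrema.
theorem td_mahat_loop_eq (l : List Char) : ∀ (m x y p q hp lp hq lq : Int),
    p = x + y → q = x - y → m = max (max (max hp (-lp)) hq) (-lq) →
    (l.foldl
      (fun (st : Int × Int × Int) c =>
        let m := st.1
        let x := st.2.1
        let y := st.2.2
        let pt : Int × Int :=
          if c = 'u' then (x, y + 1)
          else if c = 'd' then (x, y - 1)
          else if c = 'r' then (x + 1, y)
          else if c = 'l' then (x - 1, y)
          else (x, y)
        (max m (|pt.1| + |pt.2|), pt.1, pt.2))
      (m, x, y)).1
    =
    max (max (max (l.foldl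
        (fun (st : Int × Int × Int × Int × Int × Int) c =>
          let p := st.1 + tdP c
          let q := st.2.1 + tdQ c
          (p, q, max st.2.2.1 p, min st.2.2.2.1 p, max st.2.2.2.2.1 q, min st.2.2.2.2.2 q))
        (p, q, hp, lp, hq, lq)).2.2.1
      (-(l.foldl
        (fun (st : Int × Int × Int × Int × Int × Int) c =>
          let p := st.1 + tdP c
          let q := st.2.1 + tdQ c
          (p, q, max st.2.2.1 p, min st.2.2.2.1 p, max st.2.2.2.2.1 q, min st.2.2.2.2.2 q))
        (p, q, hp, lp, hq, lq)).2.2.2.1))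
      (l.foldl
        (fun (st : Int × Int × Int × Int × Int × Int) c =>
          let p := st.1 + tdP c
          let q := st.2.1 + tdQ c
          (p, q, max st.2.2.1 p, min st.2.2.2.1 p, max st.2.2.2.2.1 q, min st.2.2.2.2.2 q))
        (p, q, hp, lp, hq, lq)).2.2.2.2.1)
      (-(l.foldl
        (fun (st : Int × Int × Int × Int × Int × Int) c =>
          let p := st.1 + tdP c
          let q := st.2.1 + tdQ c
          (p, q, max st.2.2.1 p, min st.2.2.2.1 p, max st.2.2.2.2.1 q, min st.2.2.2.2.2 q))
        (p, q, hp, lp, hq, lq)).2.2.2.2.2) := by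
  induction l with
  | nil =>
      intro m x y p q hp lp hq lq hpxy hqxy hm
      simpa using hm
  | cons c rest ih =>
      intro m x y p q hp lp hq lq hpxy hqxy hm
      simp only [List.foldl]
      obtain ⟨h1, h2⟩ := td_step c x y
      have habs := td_abs_rot
        (if c = 'u' then ((x, y + 1) : Int × Int)
         else if c = 'd' then (x, y - 1)
         else if c = 'r' then (x + 1, y)
         else if c = 'l' then (x - 1, y)
         else (x, y)).1
        (if c = 'u' then ((x, y + 1) : Int × Int)
         else if c = 'd' then (x, y - 1)
         else if c = 'r' then (x + 1, y)
         else if c = 'l' then (x - 1, y)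
         else (x, y)).2
      revert h1 h2 habs
      generalize (if c = 'u' then ((x, y + 1) : Int × Int)
         else if c = 'd' then (x, y - 1)
         else if c = 'r' then (x + 1, y)
         else if c = 'l' then (x - 1, y)
         else (x, y)) = pt
      generalize tdP c = dp
      generalize tdQ c = dq
      obtain ⟨px, py⟩ := pt
      intro h1 h2 habs
      dsimp only at h1 h2 habs ⊢
      apply ih
      · omega
      · omega
      · have e1 : px + py = p + dp := by omega
        have e2 : px - py = q + dq := by omega
        rw [hm, habs, e1, e2, td_neg_min, td_neg_min]
        ac_rfl

-- ===== VERDICT =====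
theorem td_mahat_spec : Claim_equal_td_mahat := by
  intro s _
  unfold Spec_td_mahat td_mahat td_mahat_alt
  simp only []
  exact td_mahat_loop_eq s.toList 0 0 0 0 0 0 0 0 0 rfl rfl rfl
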